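-- pv_equiv track=rewrite | github.com/WearyEar/valuation-app | valuation-app/backend/services/damodaran.py | match_industry
-- ===== SOURCE A (Python) =====
-- def match_industry(yf_industry: str, damodaran_dict: dict[str, float]) -> str | None:
--     """
--     Fuzzy-match a yfinance industry string to a Damodaran industry name.
--
--     Strategy (in order):
--     1. Exact match (case-insensitive)
--     2. Substring containment either way
--     3. Keyword overlap score
--     """
--     if not yf_industry or not damodaran_dict:
--         return None
--
--     yf_lower = yf_industry.lower()
--
--     # 1. Exact
--     for name in damodaran_dict:
--         if name.lower() == yf_lower:
--             return name
--
--     # 2. Substring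
--     for name in damodaran_dict:
--         nl = name.lower()
--         if yf_lower in nl or nl in yf_lower:
--             return name
--
--     # 3. Keyword overlap
--     keywords = [w for w in yf_lower.split() if len(w) > 3]
--     best_name, best_score = None, 0
--     for name in damodaran_dict:
--         nl = name.lower()
--         score = sum(1 for kw in keywords if kw in nl)
--         if score > best_score:
--             best_score, best_name = score, name
--
--     return best_name if best_score > 0 else None
-- ===== SOURCE B (Python) =====
-- def match_industry(yf_industry: str, damodaran_dict: dict[str, float]) -> str | None:
--     """Single-pass fuzzy match: one traversal of the dict maintaining the
--     first exact match, the first substring match and the best keyword score."""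
--     if not yf_industry or not damodaran_dict:
--         return None
--     yf_lower = yf_industry.lower()
--     keywords = [w for w in yf_lower.split() if len(w) > 3]
--     exact = substr = best = None
--     best_score = 0
--     for name in damodaran_dict:
--         nl = name.lower()
--         if exact is None and nl == yf_lower:
--             exact = name
--         if substr is None and (yf_lower in nl or nl in yf_lower):
--             substr = name
--         score = sum(kw in nl for kw in keywords)
--         if score > best_score:
--             best_score, best = score, name
--     if exact is not None:
--         return exact
--     if substr is not None:
--         return substr
--     return best if best_score > 0 else None
-- ===== Notes on version B (the rewrite author's own statement) =====
-- stated objective: alternative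
-- what changed: Fuses A's three prioritized scans over the dict into a single pass that simultaneously tracks the first exact match, the first substring match and the best keyword-overlap candidate, deciding the priority once after the loop.
import Mathlib
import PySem

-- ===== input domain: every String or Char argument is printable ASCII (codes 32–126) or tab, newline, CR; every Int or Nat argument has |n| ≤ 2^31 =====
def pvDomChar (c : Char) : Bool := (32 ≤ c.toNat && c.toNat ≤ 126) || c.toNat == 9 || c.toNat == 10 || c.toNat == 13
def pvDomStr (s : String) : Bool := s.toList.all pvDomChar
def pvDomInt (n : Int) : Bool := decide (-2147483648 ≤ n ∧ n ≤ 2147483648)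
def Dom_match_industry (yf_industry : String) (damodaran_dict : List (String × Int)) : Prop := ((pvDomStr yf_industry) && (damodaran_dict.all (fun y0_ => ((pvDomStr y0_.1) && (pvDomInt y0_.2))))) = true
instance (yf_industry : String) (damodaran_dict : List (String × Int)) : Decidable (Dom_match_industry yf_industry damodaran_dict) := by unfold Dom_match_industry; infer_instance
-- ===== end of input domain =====

-- B fuses A's three prioritized scans into one accumulating pass; objective: alternative (same cost, different traversal).


-- ===== PORT A =====
-- score of one name: sum(1 for kw in keywords if kw in nl)
def scoreOf (keywords : List String) (nl : String) : Int :=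
  keywords.foldl (fun acc kw => if PySem.Str.isIn kw nl then acc + 1 else acc) 0

-- step of A's third loop over (best_name, best_score)
def bestStep (keywords : List String) (acc : Option String × Int) (p : String × Int) :
    Option String × Int :=
  let nl := PySem.Str.lower p.1
  let score := scoreOf keywords nl
  if score > acc.2 then (some p.1, score) else acc

def match_industry (yf_industry : String) (damodaran_dict : List (String × Int)) : Option String :=
  if yf_industry = "" ∨ damodaran_dict = [] then none
  else
    let yf_lower := PySem.Str.lower yf_industry
    -- 1. Exact: first name with name.lower() == yf_lower
    match damodaran_dict.find? (fun p => PySem.Str.lower p.1 == yf_lower) with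
    | some p => some p.1
    | none =>
      -- 2. Substring: first name with containment either way
      match damodaran_dict.find? (fun p =>
          PySem.Str.isIn yf_lower (PySem.Str.lower p.1) ||
          PySem.Str.isIn (PySem.Str.lower p.1) yf_lower) with
      | some p => some p.1
      | none =>
        -- 3. Keyword overlap
        let keywords := (PySem.Str.split₀ yf_lower).filter (fun w => PySem.Str.len w > 3)
        let res := damodaran_dict.foldl (bestStep keywords) (none, 0)
        if res.2 > 0 then res.1 else none

-- ===== PORT B =====
-- single-pass state: (exact, substr, best, best_score)
def altStep (yf_lower : String) (keywords : List String)
    (st : Option String × Option String × Option String × Int) (p : String × Int) :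
    Option String × Option String × Option String × Int :=
  let (e, s, b, bs) := st
  let nl := PySem.Str.lower p.1
  let e' := if e.isNone && (nl == yf_lower) then some p.1 else e
  let s' := if s.isNone && (PySem.Str.isIn yf_lower nl || PySem.Str.isIn nl yf_lower)
            then some p.1 else s
  let score := keywords.foldl (fun acc kw => acc + (if PySem.Str.isIn kw nl then 1 else 0)) 0
  if score > bs then (e', s', some p.1, score) else (e', s', b, bs)

def match_industry_alt (yf_industry : String) (damodaran_dict : List (String × Int)) : Option String :=
  if yf_industry = "" ∨ damodaran_dict = [] then none
  else
    let yf_lower := PySem.Str.lower yf_industry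
    let keywords := (PySem.Str.split₀ yf_lower).filter (fun w => PySem.Str.len w > 3)
    let (e, s, b, bs) := damodaran_dict.foldl (altStep yf_lower keywords) (none, none, none, 0)
    match e with
    | some x => some x
    | none =>
      match s with
      | some x => some x
      | none => if bs > 0 then b else none

-- ===== PRECONDITION & SPEC =====
def Spec_match_industry (yf_industry : String) (damodaran_dict : List (String × Int)) (out : Option String) : Prop := out = match_industry_alt yf_industry damodaran_dict
instance (yf_industry : String) (damodaran_dict : List (String × Int)) (out : Option String) : Decidable (Spec_match_industry yf_industry damodaran_dict out) := by unfold Spec_match_industry; infer_instance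

-- ===== CLAIM (what is proved, stated in full; the proofs are below) =====
def Claim_equal_match_industry : Prop := ∀ (yf_industry : String) (damodaran_dict : List (String × Int)), Dom_match_industry yf_industry damodaran_dict → Spec_match_industry yf_industry damodaran_dict (match_industry yf_industry damodaran_dict)

-- ===== LEMMAS AND PROOFS =====

-- the two score computations are the same fold, written with if-add vs add-if
lemma score_eq (keywords : List String) (nl : String) :
    keywords.foldl (fun acc kw => acc + (if PySem.Str.isIn kw nl then 1 else 0)) 0
      = scoreOf keywords nl := by
  unfold scoreOf
  induction keywords using List.reverseRecOn with
  | nil => rfl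
  | append_singleton ks kw ih =>
    simp only [List.foldl_append, List.foldl_cons, List.foldl_nil, ih]
    by_cases h : PySem.Chars.isIn kw.toList nl.toList <;> simp [h]

-- decomposition of B's fused fold into A's three scans
lemma fold_decomp (yf_lower : String) (keywords : List String)
    (d : List (String × Int)) (e s b : Option String) (bs : Int) :
    d.foldl (altStep yf_lower keywords) (e, s, b, bs)
      = ((e.orElse fun _ => (d.find? (fun p => PySem.Str.lower p.1 == yf_lower)).map (·.1)),
         (s.orElse fun _ => (d.find? (fun p =>
             PySem.Str.isIn yf_lower (PySem.Str.lower p.1) ||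
             PySem.Str.isIn (PySem.Str.lower p.1) yf_lower)).map (·.1)),
         d.foldl (bestStep keywords) (b, bs)) := by
  induction d generalizing e s b bs with
  | nil => cases e <;> cases s <;> simp
  | cons p d ih =>
    simp only [List.foldl_cons, List.find?_cons]
    rw [show altStep yf_lower keywords (e, s, b, bs) p =
        (let e' := if e.isNone && (PySem.Str.lower p.1 == yf_lower) then some p.1 else e
         let s' := if s.isNone && (PySem.Str.isIn yf_lower (PySem.Str.lower p.1) ||
                     PySem.Str.isIn (PySem.Str.lower p.1) yf_lower) then some p.1 else s
         (e', s', bestStep keywords (b, bs) p)) from ?_]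
    · rw [ih]
      congr 1
      · cases e with
        | some x => simp
        | none =>
          cases h : (PySem.Str.lower p.1 == yf_lower) <;> simp
      congr 1
      · cases s with
        | some x => simp
        | none =>
          cases h : (PySem.Str.isIn yf_lower (PySem.Str.lower p.1) ||
              PySem.Str.isIn (PySem.Str.lower p.1) yf_lower) <;> simp
    · simp only [altStep, bestStep, score_eq]
      by_cases h : scoreOf keywords (PySem.Str.lower p.1) > bs <;> simp [h]

-- ===== VERDICT (by name: the statement is the Claim_ definition above) =====
theorem match_industry_spec : Claim_equal_match_industry := by
  intro yf d _
  unfold Spec_match_industry match_industry match_industry_alt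
  by_cases h : yf = "" ∨ d = []
  · simp [h]
  · simp only [h, if_false]
    rw [fold_decomp]
    cases he : d.find? (fun p => PySem.Str.lower p.1 == PySem.Str.lower yf) with
    | some p => simp
    | none =>
      cases hs : d.find? (fun p =>
          PySem.Str.isIn (PySem.Str.lower yf) (PySem.Str.lower p.1) ||
          PySem.Str.isIn (PySem.Str.lower p.1) (PySem.Str.lower yf)) with
      | some p => simp
      | none => simp
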